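-- pv_equiv track=rewrite | github.com/joqjoq966/Algorithm_python | Codeforces/Round#708/c.py | solve
-- ===== SOURCE A (Python) =====
-- def solve(n,k):
--     temp = n
--     a = 1
--     if n%2==0:
--         while temp > 2 and temp%2==0:
--             a *= 2
--             temp//=2
--         return a, (n-a)//2, (n-a)//2
--     else:
--         return 1, (n-1)//2, (n-1)//2
-- ===== SOURCE B (Python) =====
-- def solve(n, k):
--     if n % 2 == 0:
--         if n > 2:
--             low = n & -n
--             a = n // 2 if low == n else low
--         else:
--             a = 1
--         return a, (n - a) // 2, (n - a) // 2
--     else: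
--         return 1, (n - 1) // 2, (n - 1) // 2
-- ===== Notes on version B (the rewrite author's own statement) =====
-- stated objective: alternative
-- what changed: A's loop that repeatedly halves n while accumulating a power of two is replaced by a branch on the closed-form lowest-set-bit expression n & -n (a = n//2 when n is a power of two, else n & -n), with the loop gone entirely.
import Mathlib
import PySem

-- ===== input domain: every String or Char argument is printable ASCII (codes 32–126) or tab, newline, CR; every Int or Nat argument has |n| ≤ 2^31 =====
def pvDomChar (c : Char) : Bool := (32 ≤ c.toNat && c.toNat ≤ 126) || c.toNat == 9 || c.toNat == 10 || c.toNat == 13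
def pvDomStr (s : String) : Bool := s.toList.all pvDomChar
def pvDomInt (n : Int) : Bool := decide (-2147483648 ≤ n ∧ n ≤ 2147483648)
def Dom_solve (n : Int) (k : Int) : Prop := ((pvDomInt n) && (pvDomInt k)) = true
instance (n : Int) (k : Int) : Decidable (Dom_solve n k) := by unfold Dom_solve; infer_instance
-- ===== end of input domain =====

-- B replaces A's halving loop by the lowest-set-bit trick (n & -n), a closed form;
-- objective: alternative/idiomatic, same observable behaviour.

-- ===== PORT A =====
-- the while loop of A: `while temp > 2 and temp % 2 == 0: a *= 2; temp //= 2`, returns a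
def solveWhileA (temp a : Int) : Int :=
  if _h : 2 < temp ∧ PySem.Int.mod temp 2 = 0 then
    solveWhileA (PySem.Int.floordiv temp 2) (a * 2)
  else a
termination_by temp.toNat
decreasing_by
  simp only [PySem.Int.floordiv, Int.fdiv_eq_ediv]
  omega

def solve (n : Int) (k : Int) : Int × Int × Int :=
  if PySem.Int.mod n 2 = 0 then
    let a := solveWhileA n 1
    (a, PySem.Int.floordiv (n - a) 2, PySem.Int.floordiv (n - a) 2)
  else
    (1, PySem.Int.floordiv (n - 1) 2, PySem.Int.floordiv (n - 1) 2)

-- ===== PORT B =====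
-- Python's `n & -n` on int is exactly two's-complement bitwise and = Int.land
def solve_alt (n : Int) (k : Int) : Int × Int × Int :=
  if PySem.Int.mod n 2 = 0 then
    let a := if 2 < n then
               let low := Int.land n (-n)
               if low = n then PySem.Int.floordiv n 2 else low
             else 1
    (a, PySem.Int.floordiv (n - a) 2, PySem.Int.floordiv (n - a) 2)
  else
    (1, PySem.Int.floordiv (n - 1) 2, PySem.Int.floordiv (n - 1) 2)

-- ===== PRECONDITION & SPEC =====
def Spec_solve (n : Int) (k : Int) (out : Int × Int × Int) : Prop := out = solve_alt n k
instance (n : Int) (k : Int) (out : Int × Int × Int) : Decidable (Spec_solve n k out) := by unfold Spec_solve; infer_instance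

-- ===== CLAIM (what is proved, stated in full; the proofs are below) =====
def Claim_equal_solve : Prop := ∀ (n : Int) (k : Int), Dom_solve n k → Spec_solve n k (solve n k)

-- ===== LEMMAS AND PROOFS =====

theorem pv_mod2 (a : Int) : PySem.Int.mod a 2 = a % 2 := by
  show a.fmod 2 = a % 2
  rw [Int.fmod_eq_emod]; norm_num

theorem pv_div2 (a : Int) : PySem.Int.floordiv a 2 = a / 2 := by
  show a.fdiv 2 = a / 2
  rw [Int.fdiv_eq_ediv]; norm_num

theorem pv_stop (t a : Int) (hc : ¬ (2 < t ∧ PySem.Int.mod t 2 = 0)) :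
    solveWhileA t a = a := by
  rw [solveWhileA, dif_neg hc]

theorem pv_step (t a : Int) (hc : 2 < t ∧ PySem.Int.mod t 2 = 0) :
    solveWhileA t a = solveWhileA (PySem.Int.floordiv t 2) (a * 2) := by
  rw [solveWhileA, dif_pos hc]

-- lowest-set-bit recursion on Nat: odd case
theorem pv_ldiff_odd (m : Nat) (h : m % 2 = 1) : Nat.ldiff m (m - 1) = 1 := by
  apply Nat.eq_of_testBit_eq
  intro i
  cases i with
  | zero =>
      rw [Nat.testBit_ldiff]
      simp only [Nat.testBit_zero]
      have h1 : (m - 1) % 2 = 0 := by omega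
      simp [h, h1]
  | succ i =>
      rw [Nat.testBit_ldiff]
      have h2 : (m - 1) / 2 = m / 2 := by omega
      simp [Nat.testBit_add_one, h2]

-- lowest-set-bit recursion on Nat: even case
theorem pv_ldiff_even (m : Nat) (h0 : 0 < m) (h : m % 2 = 0) :
    Nat.ldiff m (m - 1) = 2 * Nat.ldiff (m / 2) (m / 2 - 1) := by
  apply Nat.eq_of_testBit_eq
  intro i
  cases i with
  | zero =>
      rw [Nat.testBit_ldiff]
      simp only [Nat.testBit_zero]
      have h1 : (2 * Nat.ldiff (m / 2) (m / 2 - 1)) % 2 = 0 := by omega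
      simp [h, h1]
  | succ i =>
      rw [Nat.testBit_ldiff]
      have h2 : (m - 1) / 2 = m / 2 - 1 := by omega
      have h3 : 2 * Nat.ldiff (m / 2) (m / 2 - 1) / 2 = Nat.ldiff (m / 2) (m / 2 - 1) := by omega
      simp [Nat.testBit_add_one, h2, h3, Nat.testBit_ldiff]

theorem pv_land_cast (j : Nat) :
    Int.land ((j + 1 : Nat) : Int) (-((j + 1 : Nat) : Int)) = ((Nat.ldiff (j + 1) j : Nat) : Int) := by
  have h : -((j + 1 : Nat) : Int) = Int.negSucc j := by
    rw [Int.negSucc_eq]; push_cast; ring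
  rw [h]
  rfl

-- lowest set bit of an odd positive integer is 1
theorem pv_land_odd (n : Int) (h0 : 0 < n) (h : n % 2 = 1) : Int.land n (-n) = 1 := by
  obtain ⟨m, rfl⟩ := Int.eq_ofNat_of_zero_le h0.le
  cases m with
  | zero => omega
  | succ j =>
      rw [pv_land_cast]
      have hm : (j + 1) % 2 = 1 := by omega
      have hld := pv_ldiff_odd (j + 1) hm
      simp only [Nat.add_sub_cancel] at hld
      rw [hld]
      rfl

-- lowest set bit halves along with an even positive integer
theorem pv_land_even (n : Int) (h0 : 0 < n) (h : n % 2 = 0) :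
    Int.land n (-n) = 2 * Int.land (n / 2) (-(n / 2)) := by
  obtain ⟨m, rfl⟩ := Int.eq_ofNat_of_zero_le h0.le
  cases m with
  | zero => omega
  | succ j =>
      have hm : (j + 1) % 2 = 0 := by omega
      have hd : ((j + 1 : Nat) : Int) / 2 = (((j + 1) / 2 : Nat) : Int) := by omega
      obtain ⟨i, hi⟩ : ∃ i, (j + 1) / 2 = i + 1 := ⟨(j + 1) / 2 - 1, by omega⟩
      rw [hd, hi, pv_land_cast, pv_land_cast]
      have hld := pv_ldiff_even (j + 1) (by omega) hm
      simp only [Nat.add_sub_cancel] at hld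
      rw [hi] at hld
      simp only [Nat.add_sub_cancel] at hld
      rw [hld]
      push_cast
      ring

-- the accumulator of A's loop factors out
theorem pv_while_mul : ∀ (N : Nat) (t a : Int), t.toNat ≤ N →
    solveWhileA t a = a * solveWhileA t 1 := by
  intro N
  induction N with
  | zero =>
      intro t a h
      have hc : ¬ (2 < t ∧ PySem.Int.mod t 2 = 0) := by
        intro ⟨h2, _⟩; omega
      rw [pv_stop t a hc, pv_stop t 1 hc]
      ring
  | succ N ih =>
      intro t a h
      by_cases hc : 2 < t ∧ PySem.Int.mod t 2 = 0
      · rw [pv_step t a hc, pv_step t 1 hc]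
        have hlt : (PySem.Int.floordiv t 2).toNat ≤ N := by
          rw [pv_div2]; omega
        rw [ih _ (a * 2) hlt, ih _ (1 * 2) hlt]
        ring
      · rw [pv_stop t a hc, pv_stop t 1 hc]; ring

-- A's loop, started at an even t with accumulator 1, computes B's closed form
theorem pv_while_eq : ∀ (N : Nat) (t : Int), t.toNat ≤ N → 2 < t → t % 2 = 0 →
    solveWhileA t 1 = (if Int.land t (-t) = t then t / 2 else Int.land t (-t)) := by
  intro N
  induction N with
  | zero => intro t h h2 _; omega
  | succ N ih =>
      intro t h h2 hmod
      have hmod' : PySem.Int.mod t 2 = 0 := by rw [pv_mod2]; exact hmod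
      rw [pv_step t 1 ⟨h2, hmod'⟩, pv_div2]
      set s := t / 2 with hs
      have hts : t = 2 * s := by omega
      have hsN : s.toNat ≤ N := by omega
      have h12 : (1 : Int) * 2 = 2 := by norm_num
      rw [h12, pv_while_mul N s 2 hsN]
      have hland := pv_land_even t (by omega) hmod
      rw [← hs] at hland
      by_cases hse : s % 2 = 0
      · by_cases hs2 : 2 < s
        · -- inner even case: recurse
          rw [ih s hsN hs2 hse, hland]
          by_cases heq : Int.land s (-s) = s
          · rw [heq, if_pos rfl, if_pos hts.symm]
            omega
          · have hne : ¬ (2 * Int.land s (-s) = t) := by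
              intro hcontra; apply heq; omega
            rw [if_neg heq, if_neg hne]
        · -- s even, s ≤ 2, t > 2 even forces s = 2, t = 4
          have ht4 : t = 4 := by omega
          have hs2' : s = 2 := by omega
          rw [hs2']
          have hW : solveWhileA 2 1 = 1 := by
            apply pv_stop
            intro ⟨hh, _⟩; omega
          rw [hW, ht4]
          have h44 : Int.land 4 (-4) = 4 := by
            have a4 := pv_land_even 4 (by norm_num) (by norm_num)
            have a2 := pv_land_even 2 (by norm_num) (by norm_num)
            have a1 := pv_land_odd 1 (by norm_num) (by norm_num)
            norm_num at a4 a2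
            rw [a4, a2, a1]
            norm_num
          rw [if_pos h44]
          norm_num
      · -- s odd: loop stops after one halving
        have hstop : solveWhileA s 1 = 1 := by
          apply pv_stop
          intro ⟨_, hmm⟩
          rw [pv_mod2] at hmm
          omega
        rw [hstop]
        have hso : s % 2 = 1 := by omega
        have h1 : Int.land s (-s) = 1 := pv_land_odd s (by omega) hso
        rw [h1] at hland
        have hne : ¬ (Int.land t (-t) = t) := by rw [hland]; omega
        rw [if_neg hne, hland]

-- ===== VERDICT (by name: the statement is the Claim_ definition above) =====
theorem solve_spec : Claim_equal_solve := by
  intro n k _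
  unfold Spec_solve solve solve_alt
  by_cases hmod : PySem.Int.mod n 2 = 0
  · rw [if_pos hmod, if_pos hmod]
    by_cases h2 : 2 < n
    · have hmod' : n % 2 = 0 := by rw [pv_mod2] at hmod; exact hmod
      have hW := pv_while_eq n.toNat n le_rfl h2 hmod'
      rw [if_pos h2]
      simp only [pv_div2] at hW ⊢
      rw [hW]
    · have hW : solveWhileA n 1 = 1 := by
        apply pv_stop
        intro ⟨hh, _⟩; exact h2 hh
      rw [if_neg h2, hW]
  · rw [if_neg hmod, if_neg hmod]
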